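-- pv_equiv track=rewrite | github.com/Arkhan5F/FormulaRR | simulation.py | generate_overtake_messages
-- ===== SOURCE A (Python) =====
-- def generate_overtake_messages(overtakes):
--     overtake_summary = {}
--     for overtaker, overtaken, new_pos, old_pos in overtakes:
--         if new_pos <= 10 or old_pos <= 10:  # Only consider overtakes involving top 10 positions
--             if overtaker[0] not in overtake_summary:
--                 overtake_summary[overtaker[0]] = {'start': old_pos, 'end': new_pos, 'passed': []}
--             overtake_summary[overtaker[0]]['end'] = new_pos
--             overtake_summary[overtaker[0]]['passed'].append(overtaken[0])
--
--     messages = []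
--     for driver, summary in overtake_summary.items():
--         if summary['start'] != summary['end']:
--             passed_drivers = ', '.join(summary['passed'])
--             if summary['end'] <= 3 or summary['start'] <= 3:
--                 messages.append(f"MAJOR OVERTAKE: {driver} gained {summary['start'] - summary['end']} "
--                                 f"positions (P{summary['start']} -> P{summary['end']}), "
--                                 f"passing {passed_drivers}")
--             else:
--                 messages.append(f"OVERTAKE: {driver} gained {summary['start'] - summary['end']} "
--                                 f"positions (P{summary['start']} -> P{summary['end']}), "
--                                 f"passing {passed_drivers}")
--     return messages
-- ===== SOURCE B (Python) =====
-- def generate_overtake_messages(overtakes):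
--     # No dict at all: project the qualifying overtakes once, then for each driver
--     # (first-occurrence order, tracked by a seen list) rescan that projection to
--     # collect his entries and derive start/end/passed from them.
--     qualifying = [(overtaker[0], overtaken[0], new_pos, old_pos)
--                   for overtaker, overtaken, new_pos, old_pos in overtakes
--                   if new_pos <= 10 or old_pos <= 10]
--     messages = []
--     seen = []
--     for driver, _, _, _ in qualifying:
--         if driver in seen:
--             continue
--         seen.append(driver)
--         mine = [e for e in qualifying if e[0] == driver]
--         start = mine[0][3]
--         end = mine[-1][2]
--         if start != end:
--             passed = ', '.join(e[1] for e in mine)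
--             kind = "MAJOR OVERTAKE" if end <= 3 or start <= 3 else "OVERTAKE"
--             messages.append(f"{kind}: {driver} gained {start - end} positions "
--                             f"(P{start} -> P{end}), passing {passed}")
--     return messages
-- ===== Notes on version B (the rewrite author's own statement) =====
-- stated objective: alternative
-- what changed: B drops the summary dict entirely: it projects the qualifying overtakes into one flat list, then for each driver in first-occurrence order (tracked by a seen list) rescans that list to collect the driver's entries and derive start/end/passed from them, instead of A's single pass maintaining a running per-driver summary record in a dict.
import Mathlib
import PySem

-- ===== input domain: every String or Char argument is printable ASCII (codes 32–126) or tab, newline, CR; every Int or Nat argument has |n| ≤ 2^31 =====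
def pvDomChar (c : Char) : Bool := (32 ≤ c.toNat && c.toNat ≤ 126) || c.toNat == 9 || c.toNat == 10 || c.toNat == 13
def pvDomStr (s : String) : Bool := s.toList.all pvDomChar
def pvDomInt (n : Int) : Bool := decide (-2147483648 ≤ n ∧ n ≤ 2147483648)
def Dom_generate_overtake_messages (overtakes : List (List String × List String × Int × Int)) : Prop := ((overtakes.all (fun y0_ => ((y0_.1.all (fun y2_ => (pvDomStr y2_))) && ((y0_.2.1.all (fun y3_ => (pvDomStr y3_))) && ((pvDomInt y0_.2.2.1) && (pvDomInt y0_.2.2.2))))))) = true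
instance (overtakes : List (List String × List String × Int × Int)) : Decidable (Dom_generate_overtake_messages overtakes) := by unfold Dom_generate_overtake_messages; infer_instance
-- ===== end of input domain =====

-- B drops the summary dict: it projects the qualifying overtakes once, then per driver
-- (first-occurrence order via a seen list) rescans that projection (objective: alternative).

-- ===== PORT A =====
def pvSummaryInit : Int × Int × List String := (0, 0, [])

-- one iteration of A's first loop; the dict value is ('start', 'end', 'passed')
def pvStepA (d : PySem.Dict String (Int × Int × List String))
    (item : List String × List String × Int × Int) :
    PySem.Dict String (Int × Int × List String) :=
  if item.2.2.1 ≤ 10 ∨ item.2.2.2 ≤ 10 then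
    let k := (PySem.List.pyGet? item.1 0).getD ""      -- overtaker[0]; Pre_ excludes the IndexError inputs
    let v := (PySem.List.pyGet? item.2.1 0).getD ""    -- overtaken[0]
    let d1 := if d.contains k then d else d.insert k (item.2.2.2, item.2.2.1, ([] : List String))
    let d2 := d1.modify k pvSummaryInit (fun s => (s.1, item.2.2.1, s.2.2))        -- ['end'] = new_pos
    d2.modify k pvSummaryInit (fun s => (s.1, s.2.1, s.2.2 ++ [v]))                -- ['passed'].append(...)
  else d

def generate_overtake_messages (overtakes : List (List String × List String × Int × Int)) : List String :=
  let overtake_summary := overtakes.foldl pvStepA PySem.Dict.empty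
  overtake_summary.items.foldl (fun messages ds =>
    if ds.2.1 ≠ ds.2.2.1 then
      let passed := PySem.Str.join ", " ds.2.2.2
      if ds.2.2.1 ≤ 3 ∨ ds.2.1 ≤ 3 then
        messages ++ ["MAJOR OVERTAKE: " ++ ds.1 ++ " gained " ++ PySem.Int.toStr (ds.2.1 - ds.2.2.1) ++
          " positions (P" ++ PySem.Int.toStr ds.2.1 ++ " -> P" ++ PySem.Int.toStr ds.2.2.1 ++
          "), passing " ++ passed]
      else
        messages ++ ["OVERTAKE: " ++ ds.1 ++ " gained " ++ PySem.Int.toStr (ds.2.1 - ds.2.2.1) ++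
          " positions (P" ++ PySem.Int.toStr ds.2.1 ++ " -> P" ++ PySem.Int.toStr ds.2.2.1 ++
          "), passing " ++ passed]
    else messages) []

-- ===== PORT B =====
-- B's projected qualifying list: (overtaker[0], overtaken[0], new_pos, old_pos) per qualifying item
def pvQual (overtakes : List (List String × List String × Int × Int)) :
    List (String × String × Int × Int) :=
  (overtakes.filter (fun ov => decide (ov.2.2.1 ≤ 10 ∨ ov.2.2.2 ≤ 10))).map
    (fun ov => ((PySem.List.pyGet? ov.1 0).getD "", (PySem.List.pyGet? ov.2.1 0).getD "",
      ov.2.2.1, ov.2.2.2))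

-- one iteration of B's loop over the qualifying list; state = (seen, messages)
def pvStepB (qualifying : List (String × String × Int × Int))
    (st : List String × List String) (e : String × String × Int × Int) :
    List String × List String :=
  if e.1 ∈ st.1 then st
  else
    let seen := st.1 ++ [e.1]
    let mine := qualifying.filter (fun x => x.1 == e.1)
    let start := ((PySem.List.pyGet? mine 0).map (fun x => x.2.2.2)).getD 0      -- mine[0][3]
    let fin := ((PySem.List.pyGet? mine (-1)).map (fun x => x.2.2.1)).getD 0     -- mine[-1][2]
    if start ≠ fin then
      let passed := PySem.Str.join ", " (mine.map (fun x => x.2.1))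
      let kind := if fin ≤ 3 ∨ start ≤ 3 then "MAJOR OVERTAKE" else "OVERTAKE"
      (seen, st.2 ++ [kind ++ ": " ++ e.1 ++ " gained " ++ PySem.Int.toStr (start - fin) ++
        " positions (P" ++ PySem.Int.toStr start ++ " -> P" ++ PySem.Int.toStr fin ++
        "), passing " ++ passed])
    else (seen, st.2)

def generate_overtake_messages_alt (overtakes : List (List String × List String × Int × Int)) : List String :=
  let qualifying := pvQual overtakes
  (qualifying.foldl (pvStepB qualifying) ([], [])).2

-- ===== PRECONDITION & SPEC =====
-- Pre_ excludes exactly the inputs on which Python A raises IndexError: a qualifying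
-- overtake whose overtaker or overtaken list is empty (overtaker[0]/overtaken[0]).
def Pre_generate_overtake_messages (overtakes : List (List String × List String × Int × Int)) : Prop :=
  ∀ item ∈ overtakes, (item.2.2.1 ≤ 10 ∨ item.2.2.2 ≤ 10) → (item.1 ≠ [] ∧ item.2.1 ≠ [])
instance (overtakes : List (List String × List String × Int × Int)) : Decidable (Pre_generate_overtake_messages overtakes) := by unfold Pre_generate_overtake_messages; infer_instance

def pvWitness_generate_overtake_messages : (List (List String × List String × Int × Int)) :=
  [(["VER"], ["HAM"], 1, 3), (["ALO"], ["SAI"], 7, 8)]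

def Spec_generate_overtake_messages (overtakes : List (List String × List String × Int × Int)) (out : List String) : Prop := out = generate_overtake_messages_alt overtakes
instance (overtakes : List (List String × List String × Int × Int)) (out : List String) : Decidable (Spec_generate_overtake_messages overtakes out) := by unfold Spec_generate_overtake_messages; infer_instance

-- ===== CLAIM (what is proved, stated in full; the proofs are below) =====
def Claim_equal_generate_overtake_messages : Prop := ∀ (overtakes : List (List String × List String × Int × Int)), Dom_generate_overtake_messages overtakes → Pre_generate_overtake_messages overtakes → Spec_generate_overtake_messages overtakes (generate_overtake_messages overtakes)

-- ===== LEMMAS AND PROOFS =====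

-- abbreviations for the proofs (not used by the ports)
def pvProj (ov : List String × List String × Int × Int) : String × String × Int × Int :=
  ((PySem.List.pyGet? ov.1 0).getD "", (PySem.List.pyGet? ov.2.1 0).getD "", ov.2.2.1, ov.2.2.2)

-- A's step on an already-projected qualifying entry
def pvStepA' (d : PySem.Dict String (Int × Int × List String))
    (e : String × String × Int × Int) : PySem.Dict String (Int × Int × List String) :=
  let d1 := if d.contains e.1 then d else d.insert e.1 (e.2.2.2, e.2.2.1, ([] : List String))
  let d2 := d1.modify e.1 pvSummaryInit (fun s => (s.1, e.2.2.1, s.2.2))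
  d2.modify e.1 pvSummaryInit (fun s => (s.1, s.2.1, s.2.2 ++ [e.2.1]))

def pvUpd (e : String × String × Int × Int) (s : Int × Int × List String) : Int × Int × List String :=
  (s.1, e.2.2.1, s.2.2 ++ [e.2.1])
def pvOne (e : String × String × Int × Int) : Int × Int × List String :=
  (e.2.2.2, e.2.2.1, [e.2.1])

-- the abstract per-key accumulator A's dict maintains
def pvAbs (o : Option (Int × Int × List String)) (l : List (String × String × Int × Int)) :
    Option (Int × Int × List String) :=
  l.foldl (fun o e => some (match o with | some s => pvUpd e s | none => pvOne e)) o

-- first pass of A, rephrased over the projected qualifying list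
theorem pvStepA_eq (d : PySem.Dict String (Int × Int × List String))
    (item : List String × List String × Int × Int) :
    pvStepA d item = if item.2.2.1 ≤ 10 ∨ item.2.2.2 ≤ 10 then pvStepA' d (pvProj item) else d := by
  by_cases h : item.2.2.1 ≤ 10 ∨ item.2.2.2 ≤ 10 <;> simp [pvStepA, pvStepA', pvProj, h]

theorem pvFoldA_eq (overtakes : List (List String × List String × Int × Int))
    (d : PySem.Dict String (Int × Int × List String)) :
    overtakes.foldl pvStepA d = (pvQual overtakes).foldl pvStepA' d := by
  induction overtakes generalizing d with
  | nil => rfl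
  | cons ov t ih =>
    by_cases h : ov.2.2.1 ≤ 10 ∨ ov.2.2.2 ≤ 10 <;>
      simp [pvQual, h, List.foldl_cons, pvStepA_eq, ih, pvProj] at ih ⊢

theorem pvGet_stepA'_self (d : PySem.Dict String (Int × Int × List String))
    (e : String × String × Int × Int) :
    (pvStepA' d e).get? e.1 = some (match d.get? e.1 with | some s => pvUpd e s | none => pvOne e) := by
  unfold pvStepA'
  cases hg : d.get? e.1 with
  | some s =>
    have hc : d.contains e.1 = true := by rw [PySem.Dict.contains_eq_isSome_get?, hg]; rfl
    simp [hc, PySem.Dict.modify, PySem.Dict.getD_eq_get?_getD, hg,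
      PySem.Dict.insert_insert_self, PySem.Dict.get?_insert_self, pvUpd]
  | none =>
    have hc : d.contains e.1 = false := by rw [PySem.Dict.contains_eq_isSome_get?, hg]; rfl
    simp [hc, PySem.Dict.modify, PySem.Dict.insert_insert_self,
      PySem.Dict.get?_insert_self, PySem.Dict.getD_eq_get?_getD, pvOne, pvSummaryInit]

theorem pvGet_stepA'_ne (d : PySem.Dict String (Int × Int × List String))
    (e : String × String × Int × Int) (k : String) (h : k ≠ e.1) :
    (pvStepA' d e).get? k = d.get? k := by
  unfold pvStepA'
  by_cases hc : d.contains e.1 <;>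
    simp [hc, PySem.Dict.modify, PySem.Dict.get?_insert_of_ne _ _ h]

theorem pvGet_fold (q : List (String × String × Int × Int))
    (d : PySem.Dict String (Int × Int × List String)) (k : String) :
    (q.foldl pvStepA' d).get? k = pvAbs (d.get? k) (q.filter (fun e => e.1 == k)) := by
  induction q generalizing d with
  | nil => rfl
  | cons e t ih =>
    rw [List.foldl_cons, ih, List.filter_cons]
    by_cases h : e.1 = k
    · subst h
      simp only [beq_self_eq_true, if_pos, pvAbs, List.foldl_cons, pvGet_stepA'_self]
    · have : (e.1 == k) = false := beq_eq_false_iff_ne.2 h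
      rw [this, if_neg (by simp), pvGet_stepA'_ne d e k (fun hk => h hk.symm)]

theorem pvKeys_stepA' (d : PySem.Dict String (Int × Int × List String))
    (e : String × String × Int × Int) :
    (pvStepA' d e).keys = PySem.Set.add d.keys e.1 := by
  unfold pvStepA'
  by_cases hc : d.contains e.1
  · have hm : e.1 ∈ d.keys := (PySem.Dict.contains_iff_mem_keys d e.1).1 hc
    simp only [hc, if_pos, PySem.Dict.modify]
    rw [PySem.Dict.keys_insert_of_contains _ _ (by simp [PySem.Dict.contains_insert_self]),
      PySem.Dict.keys_insert_of_contains _ _ hc, PySem.Set.add_of_mem hm]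
  · have hm : e.1 ∉ d.keys := fun h => hc ((PySem.Dict.contains_iff_mem_keys d e.1).2 h)
    simp only [hc, Bool.false_eq_true, if_false, PySem.Dict.modify]
    rw [PySem.Dict.keys_insert_of_contains _ _ (by simp [PySem.Dict.contains_insert_self]),
      PySem.Dict.keys_insert_of_contains _ _ (by simp [PySem.Dict.contains_insert_self]),
      PySem.Dict.keys_insert_of_not_contains _ _ (by simpa using hc),
      PySem.Set.add_of_not_mem hm]

theorem pvKeys_fold (q : List (String × String × Int × Int))
    (d : PySem.Dict String (Int × Int × List String)) :
    (q.foldl pvStepA' d).keys = PySem.Set.update d.keys (q.map (fun e => e.1)) := by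
  induction q generalizing d with
  | nil => rfl
  | cons e t ih =>
    rw [List.foldl_cons, ih, pvKeys_stepA', List.map_cons, PySem.Set.update_cons]

theorem pvAbs_some (l : List (String × String × Int × Int)) (s : Int × Int × List String) :
    pvAbs (some s) l
      = some (s.1, ((l.getLast?).map (fun e => e.2.2.1)).getD s.2.1, s.2.2 ++ l.map (fun e => e.2.1)) := by
  induction l generalizing s with
  | nil => simp [pvAbs]
  | cons e t ih =>
    show pvAbs (some (pvUpd e s)) t = _
    rw [ih]
    cases t with
    | nil => simp [pvUpd]
    | cons b u =>
      rw [List.getLast?_cons_cons]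
      rcases hx : (b :: u).getLast? with _ | x
      · exact absurd (List.getLast?_eq_none_iff.1 hx) (by simp)
      · simp [pvUpd]

theorem pvAbs_none (l : List (String × String × Int × Int)) (h : l ≠ []) :
    pvAbs none l
      = some (((l.head?).map (fun e => e.2.2.2)).getD 0,
              ((l.getLast?).map (fun e => e.2.2.1)).getD 0, l.map (fun e => e.2.1)) := by
  cases l with
  | nil => exact absurd rfl h
  | cons e t =>
    show pvAbs (some (pvOne e)) t = _
    rw [pvAbs_some]
    cases t with
    | nil => simp [pvOne]
    | cons b u =>
      rw [List.getLast?_cons_cons]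
      rcases hx : (b :: u).getLast? with _ | x
      · exact absurd (List.getLast?_eq_none_iff.1 hx) (by simp)
      · simp [pvOne]

-- per-key emitted message (if any), computed from the qualifying list
def pvEmit (q : List (String × String × Int × Int)) (k : String) : List String :=
  let mine := q.filter (fun x => x.1 == k)
  let start := (((mine.head?)).map (fun x => x.2.2.2)).getD 0
  let fin := ((mine.getLast?).map (fun x => x.2.2.1)).getD 0
  if start ≠ fin then
    [(if fin ≤ 3 ∨ start ≤ 3 then "MAJOR OVERTAKE: " else "OVERTAKE: ") ++ k ++ " gained " ++
      PySem.Int.toStr (start - fin) ++ " positions (P" ++ PySem.Int.toStr start ++ " -> P" ++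
      PySem.Int.toStr fin ++ "), passing " ++ PySem.Str.join ", " (mine.map (fun x => x.2.1))]
  else []

-- B's first-occurrence key order, relative to an already-seen prefix
def pvNewKeys (s : List String) : List String → List String
  | [] => []
  | a :: l => if a ∈ s then pvNewKeys s l else a :: pvNewKeys (s ++ [a]) l

theorem pvUpdate_eq_append_newKeys (ks : List String) (s : List String) :
    PySem.Set.update s ks = s ++ pvNewKeys s ks := by
  induction ks generalizing s with
  | nil => simp [PySem.Set.update_nil, pvNewKeys]
  | cons a l ih =>
    rw [PySem.Set.update_cons, PySem.Set.add_eq_ite, pvNewKeys]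
    by_cases h : a ∈ s
    · rw [if_pos h, if_pos h, ih]
    · rw [if_neg h, if_neg h, ih, List.append_assoc]
      rfl

theorem pvStepB_mem (Q : List (String × String × Int × Int)) (s m : List String)
    (e : String × String × Int × Int) (h : e.1 ∈ s) : pvStepB Q (s, m) e = (s, m) := by
  simp [pvStepB, h]

theorem pvStepB_not_mem (Q : List (String × String × Int × Int)) (s m : List String)
    (e : String × String × Int × Int) (h : e.1 ∉ s) :
    pvStepB Q (s, m) e = (s ++ [e.1], m ++ pvEmit Q e.1) := by
  have hi : (e.1 ∈ (s, m).1) = False := by simp [h]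
  simp only [pvStepB, hi, if_false, pvEmit, PySem.List.pyGet?_zero, PySem.List.pyGet?_neg_one,
    List.head?_eq_getElem?]
  split_ifs <;>
    simp [show ("MAJOR OVERTAKE" ++ ": " : String) = "MAJOR OVERTAKE: " from rfl,
      show ("OVERTAKE" ++ ": " : String) = "OVERTAKE: " from rfl]

theorem pvFoldB (Q l : List (String × String × Int × Int)) (s m : List String) :
    (l.foldl (pvStepB Q) (s, m)).2 = m ++ (pvNewKeys s (l.map (fun e => e.1))).flatMap (pvEmit Q) := by
  induction l generalizing s m with
  | nil => simp [pvNewKeys]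
  | cons e t ih =>
    rw [List.foldl_cons, List.map_cons, pvNewKeys]
    by_cases h : e.1 ∈ s
    · rw [if_pos h, pvStepB_mem Q s m e h, ih]
    · rw [if_neg h, pvStepB_not_mem Q s m e h, ih, List.flatMap_cons]
      simp

-- per-item emission of A's second loop
def pvEmitPair (ds : String × Int × Int × List String) : List String :=
  if ds.2.1 ≠ ds.2.2.1 then
    [(if ds.2.2.1 ≤ 3 ∨ ds.2.1 ≤ 3 then "MAJOR OVERTAKE: " else "OVERTAKE: ") ++ ds.1 ++
      " gained " ++ PySem.Int.toStr (ds.2.1 - ds.2.2.1) ++ " positions (P" ++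
      PySem.Int.toStr ds.2.1 ++ " -> P" ++ PySem.Int.toStr ds.2.2.1 ++ "), passing " ++
      PySem.Str.join ", " ds.2.2.2]
  else []

theorem pvPassA (l : List (String × Int × Int × List String)) (acc : List String) :
    l.foldl (fun messages ds =>
      if ds.2.1 ≠ ds.2.2.1 then
        let passed := PySem.Str.join ", " ds.2.2.2
        if ds.2.2.1 ≤ 3 ∨ ds.2.1 ≤ 3 then
          messages ++ ["MAJOR OVERTAKE: " ++ ds.1 ++ " gained " ++ PySem.Int.toStr (ds.2.1 - ds.2.2.1) ++
            " positions (P" ++ PySem.Int.toStr ds.2.1 ++ " -> P" ++ PySem.Int.toStr ds.2.2.1 ++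
            "), passing " ++ passed]
        else
          messages ++ ["OVERTAKE: " ++ ds.1 ++ " gained " ++ PySem.Int.toStr (ds.2.1 - ds.2.2.1) ++
            " positions (P" ++ PySem.Int.toStr ds.2.1 ++ " -> P" ++ PySem.Int.toStr ds.2.2.1 ++
            "), passing " ++ passed]
      else messages) acc = acc ++ l.flatMap pvEmitPair := by
  induction l generalizing acc with
  | nil => simp
  | cons ds t ih =>
    rw [List.foldl_cons, List.flatMap_cons, ih, ← List.append_assoc]
    congr 1
    unfold pvEmitPair
    split_ifs with h1 h2 <;> simp
-- ===== VERDICT (by name: the statement is the Claim_ definition above) =====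
theorem generate_overtake_messages_spec : Claim_equal_generate_overtake_messages := by
  intro ov _hdom _hpre
  unfold Spec_generate_overtake_messages
  have hA : generate_overtake_messages ov
      = [] ++ ((ov.foldl pvStepA PySem.Dict.empty).items).flatMap pvEmitPair := pvPassA _ []
  have hB : generate_overtake_messages_alt ov
      = [] ++ (pvNewKeys [] ((pvQual ov).map (fun e => e.1))).flatMap (pvEmit (pvQual ov)) :=
    pvFoldB (pvQual ov) (pvQual ov) [] []
  rw [hA, hB, pvFoldA_eq]
  set Q := pvQual ov with hQ
  set D := Q.foldl pvStepA' PySem.Dict.empty with hD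
  have hkeys : D.keys = PySem.Set.ofList (Q.map (fun e => e.1)) := by
    rw [hD, pvKeys_fold]
    simp [PySem.Dict.keys_empty, PySem.Set.update_nil_left]
  have hnd : D.keys.Nodup := by rw [hkeys]; exact PySem.Set.nodup_ofList _
  have hitems : D.items = D.keys.map (fun k => (k, D.getD k pvSummaryInit)) :=
    PySem.Dict.items_eq_map_keys D hnd pvSummaryInit
  have hemit : ∀ k ∈ D.keys, pvEmitPair (k, D.getD k pvSummaryInit) = pvEmit Q k := by
    intro k hk
    have hmem : k ∈ Q.map (fun e => e.1) := by
      rw [hkeys] at hk; exact (PySem.Set.mem_ofList _ _).1 hk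
    obtain ⟨e, he, hek⟩ := List.mem_map.1 hmem
    have hne : Q.filter (fun x => x.1 == k) ≠ [] :=
      List.ne_nil_of_mem (List.mem_filter.2 ⟨he, by simp [hek]⟩)
    have hget : D.getD k pvSummaryInit =
        ((((Q.filter (fun x => x.1 == k)).head?).map (fun x => x.2.2.2)).getD 0,
         (((Q.filter (fun x => x.1 == k)).getLast?).map (fun x => x.2.2.1)).getD 0,
         (Q.filter (fun x => x.1 == k)).map (fun x => x.2.1)) := by
      rw [PySem.Dict.getD_eq_get?_getD, hD, pvGet_fold, PySem.Dict.get?_empty, pvAbs_none _ hne]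
      rfl
    rw [hget]
    rfl
  have hnew : pvNewKeys [] (Q.map (fun e => e.1)) = PySem.Set.ofList (Q.map (fun e => e.1)) := by
    have h := pvUpdate_eq_append_newKeys (Q.map (fun e => e.1)) []
    rw [PySem.Set.update_nil_left] at h
    simpa using h.symm
  rw [hitems, hnew, ← hkeys, List.flatMap_map]
  exact congrArg _ (List.flatMap_congr hemit)
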